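-- pv_equiv track=rewrite | github.com/yoseidonn/Kelebek-App | App/database.py | create_arrangement
-- ===== SOURCE A (Python) =====
-- def create_arrangement(kacli: str, ogretmen_yonu: str, oturma_duzeni: str):
--     """
--     Verilen derslik özelliklerine göre öğrenci dağıtmak için kullanılacak olan bir düzen oluşturur.
--     [
--         [
--             {1: {"exam_name": None, "student": None}, 2: {"exam_name": None, "student": None}},
--             {3: {"exam_name": None, "student": None}, 4: {"exam_name": None, "student": None}},
--             {5: {"exam_name": None, "student": None}, 6: {"exam_name": None, "student": None}},
--             {7: {"exam_name": None, "student": None}, 8: {"exam_name": None, "student": None}}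
--         ],
--         [
--             {9: {"exam_name": None, "student": None}, 10: {"exam_name": None, "student": None}},
--             {11: {"exam_name": None, "student": None}, 12: {"exam_name": None, "student": None}},
--             {13: {"exam_name": None, "student": None}, 14: {"exam_name": None, "student": None}},
--         ],
--     ]
--     """
--
--     rowCounts = oturma_duzeni.split(",")
--     matrix = []
--     # KUTUCUKLARI KOY
--     for rowCount in rowCounts:
--         matrix.append([])
--         for _ in range( int(rowCount) ):
--             matrix[-1].append({})
--
--     #INDEXLERI YERLESTIR
--     deskNo = 1
--     if ogretmen_yonu == "Solda":
--         for colIndex in range(len(matrix)):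
--             for rowIndex in range(len(matrix[colIndex])):
--                 matrix[colIndex][rowIndex].update({deskNo: {"exam_name": None, "student": None}})
--                 deskNo += 1
--                 if kacli == "2'li":
--                     matrix[colIndex][rowIndex].update({deskNo: {"exam_name": None, "student": None}})
--                     deskNo += 1
--
--     else:
--         for colIndex in range(len(matrix) - 1 , -1, -1):
--             for rowIndex in range(len(matrix[colIndex])):
--                 if kacli == "1'li":
--                     matrix[colIndex][rowIndex].update({deskNo: {"exam_name": None, "student": None}})
--                     deskNo += 1
--                 else:
--                     deskNo += 1
--                     matrix[colIndex][rowIndex].update({deskNo: {"exam_name": None, "student": None}})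
--                     deskNo -= 1
--                     matrix[colIndex][rowIndex].update({deskNo: {"exam_name": None, "student": None}})
--                     deskNo += 2
--
--     return matrix
-- ===== SOURCE B (Python) =====
-- def create_arrangement(kacli: str, ogretmen_yonu: str, oturma_duzeni: str):
--     counts = [int(x) for x in oturma_duzeni.split(",")]
--     desk = lambda: {"exam_name": None, "student": None}
--     solda = ogretmen_yonu == "Solda"
--     if solda:
--         per = 2 if kacli == "2'li" else 1
--         offsets = range(per)                   # desks within a cell, left to right
--     else:
--         per = 1 if kacli == "1'li" else 2
--         offsets = range(per - 1, -1, -1)       # right to left, like the column order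
--     # starting desk number of each column, by a prefix sum in traversal order
--     sizes = [per * c for c in counts]
--     starts = []
--     n = 1
--     for size in (sizes if solda else reversed(sizes)):
--         starts.append(n)
--         n += size
--     if not solda:
--         starts.reverse()
--     return [[{start + per * j + k: desk() for k in offsets} for j in range(c)]
--             for c, start in zip(counts, starts)]
-- ===== Notes on version B (the rewrite author's own statement) =====
-- stated objective: simpler
-- what changed: Replaces A's two-phase build (allocate empty dicts, then renumber them with direction-dependent nested index loops threading a mutable desk counter) by a single-pass construction: desks-per-cell and the within-cell desk order are fixed up front per direction, each column's starting desk number comes from one prefix sum over column sizes in traversal order, and every cell dict is built directly at desk number start+per*j; …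
import Mathlib
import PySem

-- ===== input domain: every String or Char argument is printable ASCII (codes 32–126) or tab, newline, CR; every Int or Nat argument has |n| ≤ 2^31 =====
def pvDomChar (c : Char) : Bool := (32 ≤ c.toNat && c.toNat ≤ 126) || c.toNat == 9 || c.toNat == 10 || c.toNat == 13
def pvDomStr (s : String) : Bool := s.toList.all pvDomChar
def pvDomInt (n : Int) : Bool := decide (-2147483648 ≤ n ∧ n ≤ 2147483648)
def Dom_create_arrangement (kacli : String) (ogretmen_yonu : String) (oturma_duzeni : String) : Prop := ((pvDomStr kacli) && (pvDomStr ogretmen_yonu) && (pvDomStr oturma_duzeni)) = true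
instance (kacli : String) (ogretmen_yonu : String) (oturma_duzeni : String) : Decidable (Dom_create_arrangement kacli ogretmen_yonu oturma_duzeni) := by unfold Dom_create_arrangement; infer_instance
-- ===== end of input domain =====

-- B builds the matrix in one pass from prefix-sum desk offsets instead of A's
-- allocate-empty-dicts-then-renumber two-phase loops; objective: simpler, same cost.
-- Pre_ excludes layout strings with unparseable pieces (A raises ValueError) and
-- negative row counts, which lie outside the natural domain of a seating layout.


-- ===== PORT A =====
-- the inner dict literal {"exam_name": None, "student": None}
def pvInner : List (String × Option String) := [("exam_name", none), ("student", none)]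

-- matrix[colIndex][rowIndex].update({deskNo: {"exam_name": None, "student": None}})
-- (dict.update with a single fresh-or-present key is Dict.insert on the assoc list)
def pvUpd (m : List (List (List (Int × List (String × Option String)))))
    (colIndex rowIndex deskNo : Int) : List (List (List (Int × List (String × Option String)))) :=
  let row := PySem.List.pyGetD m colIndex []
  let cell := PySem.List.pyGetD row rowIndex []
  PySem.List.pySetD m colIndex
    (PySem.List.pySetD row rowIndex ((PySem.Dict.mk cell).insert deskNo pvInner).items)

def create_arrangement (kacli : String) (ogretmen_yonu : String) (oturma_duzeni : String) : List (List (List (Int × List (String × Option String)))) :=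
  let rowCounts := (PySem.Str.split? oturma_duzeni ",").getD []
  -- KUTUCUKLARI KOY
  let matrix := rowCounts.foldl (fun matrix rowCount =>
    let matrix := matrix ++ [[]]
    (PySem.List.pyRange 0 ((PySem.Int.ofStr? rowCount).getD 0) 1).foldl
      (fun matrix _ =>
        PySem.List.pySetD matrix (-1) (PySem.List.pyGetD matrix (-1) [] ++ [[]]))
      matrix) []
  -- INDEXLERI YERLESTIR
  if ogretmen_yonu == "Solda" then
    ((PySem.List.pyRange 0 (PySem.List.len matrix) 1).foldl
      (fun (st : List (List (List (Int × List (String × Option String)))) × Int) colIndex =>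
        (PySem.List.pyRange 0 (PySem.List.len (PySem.List.pyGetD st.1 colIndex [])) 1).foldl
          (fun st rowIndex =>
            let m := pvUpd st.1 colIndex rowIndex st.2
            let deskNo := st.2 + 1
            if kacli == "2'li" then
              (pvUpd m colIndex rowIndex deskNo, deskNo + 1)
            else
              (m, deskNo)) st)
      (matrix, 1)).1
  else
    ((PySem.List.pyRange (PySem.List.len matrix - 1) (-1) (-1)).foldl
      (fun (st : List (List (List (Int × List (String × Option String)))) × Int) colIndex =>
        (PySem.List.pyRange 0 (PySem.List.len (PySem.List.pyGetD st.1 colIndex [])) 1).foldl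
          (fun st rowIndex =>
            if kacli == "1'li" then
              (pvUpd st.1 colIndex rowIndex st.2, st.2 + 1)
            else
              let deskNo := st.2 + 1
              let m := pvUpd st.1 colIndex rowIndex deskNo
              let deskNo := deskNo - 1
              let m := pvUpd m colIndex rowIndex deskNo
              (m, deskNo + 2)) st)
      (matrix, 1)).1

-- ===== PORT B =====
def create_arrangement_alt (kacli : String) (ogretmen_yonu : String) (oturma_duzeni : String) : List (List (List (Int × List (String × Option String)))) :=
  let counts := ((PySem.Str.split? oturma_duzeni ",").getD []).map
    (fun x => (PySem.Int.ofStr? x).getD 0)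
  let solda := ogretmen_yonu == "Solda"
  let per : Int := if solda then (if kacli == "2'li" then 2 else 1)
                   else (if kacli == "1'li" then 1 else 2)
  -- desks within a cell: left to right, or right to left like the column order
  let offsets : List Int := if solda then PySem.List.pyRange 0 per 1
                            else PySem.List.pyRange (per - 1) (-1) (-1)
  -- starting desk number of each column, by a prefix sum in traversal order
  let sizes := counts.map (fun c => per * c)
  let starts := ((if solda then sizes else sizes.reverse).foldl
    (fun (st : List Int × Int) size => (st.1 ++ [st.2], st.2 + size)) ([], 1)).1
  let starts := if solda then starts else starts.reverse
  (counts.zip starts).map (fun p =>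
    (PySem.List.pyRange 0 p.1 1).map (fun j =>
      (offsets.foldl (fun d k => d.insert (p.2 + per * j + k) pvInner)
        (PySem.Dict.mk [])).items))

-- ===== PRECONDITION & SPEC =====
-- Pre_ excludes inputs where int(piece) raises ValueError (A returns nothing there) and
-- negative row counts, which are outside the natural domain of a seating layout string
-- (A returns an empty row there; B's prefix-sum offsets shift the later desk numbers).
def Pre_create_arrangement (kacli : String) (ogretmen_yonu : String) (oturma_duzeni : String) : Prop :=
  (((PySem.Str.split? oturma_duzeni ",").getD []).all
    (fun s => match PySem.Int.ofStr? s with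
              | some v => decide (0 ≤ v)
              | none => false)) = true
instance (kacli : String) (ogretmen_yonu : String) (oturma_duzeni : String) : Decidable (Pre_create_arrangement kacli ogretmen_yonu oturma_duzeni) := by unfold Pre_create_arrangement; infer_instance

def pvWitness_create_arrangement : String × String × String := ("2'li", "Solda", "2,3")

def Spec_create_arrangement (kacli : String) (ogretmen_yonu : String) (oturma_duzeni : String) (out : List (List (List (Int × List (String × Option String))))) : Prop := out = create_arrangement_alt kacli ogretmen_yonu oturma_duzeni
instance (kacli : String) (ogretmen_yonu : String) (oturma_duzeni : String) (out : List (List (List (Int × List (String × Option String))))) : Decidable (Spec_create_arrangement kacli ogretmen_yonu oturma_duzeni out) := by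
  unfold Spec_create_arrangement
  letI d3 : DecidableEq (List (Int × List (String × Option String))) := inferInstance
  letI d4 : DecidableEq (List (List (Int × List (String × Option String)))) := inferInstance
  letI d5 : DecidableEq (List (List (List (Int × List (String × Option String))))) := inferInstance
  infer_instance

-- ===== CLAIM (what is proved, stated in full; the proofs are below) =====
def Claim_equal_create_arrangement : Prop := ∀ (kacli : String) (ogretmen_yonu : String) (oturma_duzeni : String), Dom_create_arrangement kacli ogretmen_yonu oturma_duzeni → Pre_create_arrangement kacli ogretmen_yonu oturma_duzeni → Spec_create_arrangement kacli ogretmen_yonu oturma_duzeni (create_arrangement kacli ogretmen_yonu oturma_duzeni)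

-- ===== LEMMAS AND PROOFS =====

abbrev PvCell := List (Int × List (String × Option String))
abbrev PvRow := List PvCell
abbrev PvMat := List PvRow

-- proof helpers
def pvRowRef (g : Int → PvCell) (per d : Int) : Nat → PvRow
  | 0 => []
  | t+1 => g d :: pvRowRef g per (d+per) t

def pvFillFwd (g : Int → PvCell) (per : Int) : List Nat → Int → PvMat
  | [], _ => []
  | n :: ns, d => pvRowRef g per d n :: pvFillFwd g per ns (d + per * n)

def pvFillBwd (g : Int → PvCell) (per : Int) : List Nat → Int → PvMat × Int
  | [], d => ([], d)
  | n :: ns, d =>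
    let p := pvFillBwd g per ns d
    (pvRowRef g per p.2 n :: p.1, p.2 + per * n)

def pvStartsFrom (d : Int) : List Int → List Int
  | [] => []
  | s :: l => d :: pvStartsFrom (d + s) l

def pvStartsB (d : Int) : List Int → List Int
  | [] => []
  | _ :: rest => (d + rest.sum) :: pvStartsB d rest

lemma pvSetLast {α : Type} (xs : List α) (x v : α) :
    PySem.List.pySetD (xs ++ [x]) (-1) v = xs ++ [v] := by
  simp [PySem.List.pySetD, PySem.List.pySet?, PySem.List.pyIdx?]

lemma pvGetAt {α : Type} (pre : List α) (x : α) (rest : List α) (d : α) :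
    PySem.List.pyGetD (pre ++ x :: rest) (pre.length : Int) d = x := by
  simp

lemma pvSetAt {α : Type} (pre : List α) (x v : α) (rest : List α) :
    PySem.List.pySetD (pre ++ x :: rest) (pre.length : Int) v = pre ++ v :: rest := by
  simp

-- A's "matrix[colIndex][rowIndex].update({k: …})" on the decomposed matrix
lemma pvUpd_eq (pre : PvMat) (done : PvRow) (cell : PvCell) (tail : PvRow) (rest : PvMat) (k : Int) :
    pvUpd (pre ++ (done ++ cell :: tail) :: rest) (pre.length : Int) (done.length : Int) k
      = pre ++ (done ++ (((PySem.Dict.mk cell).insert k pvInner).items) :: tail) :: rest := by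
  simp only [pvUpd, pvGetAt, pvSetAt]

-- inner row-build loop of phase 1: appends int(rowCount) empty dicts to the last row
lemma pvBuildRow {β : Type} (l : List β) (m : PvMat) (row : PvRow) :
    l.foldl (fun matrix _ =>
        PySem.List.pySetD matrix (-1) (PySem.List.pyGetD matrix (-1) [] ++ [[]])) (m ++ [row])
      = m ++ [row ++ List.replicate l.length ([] : PvCell)] := by
  induction l generalizing row with
  | nil => simp
  | cons b l ih =>
    simp only [List.foldl_cons]
    rw [PySem.List.pyGetD_neg_one_append_singleton, pvSetLast, ih]
    simp [List.replicate_succ]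

-- phase 1: the skeleton matrix
lemma pvSkeleton (rowCounts : List String) (acc : PvMat) :
    rowCounts.foldl (fun matrix rowCount =>
      (PySem.List.pyRange 0 ((PySem.Int.ofStr? rowCount).getD 0) 1).foldl
        (fun matrix _ =>
          PySem.List.pySetD matrix (-1) (PySem.List.pyGetD matrix (-1) [] ++ [[]]))
        (matrix ++ [[]])) acc
    = acc ++ rowCounts.map (fun rc =>
        List.replicate ((PySem.Int.ofStr? rc).getD 0).toNat ([] : PvCell)) := by
  induction rowCounts generalizing acc with
  | nil => simp
  | cons rc l ih =>
    simp only [List.foldl_cons, List.map_cons]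
    rw [pvBuildRow, ih]
    simp [PySem.List.length_pyRange_one]

-- the generic inner fill loop (phase 2, one row)
lemma pvInnerLoop (istep : PvMat × Int → Int → PvMat × Int) (g : Int → PvCell) (per : Int)
    (c : Int)
    (H : ∀ (pre : PvMat) (done tail : PvRow) (rest : PvMat) (d : Int),
      (pre.length : Int) = c →
      istep (pre ++ (done ++ ([] : PvCell) :: tail) :: rest, d) (done.length : Int)
        = (pre ++ (done ++ g d :: tail) :: rest, d + per)) :
    ∀ (t : Nat) (pre : PvMat) (rest : PvMat) (done : PvRow) (d : Int),
      (pre.length : Int) = c →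
      (PySem.List.pyRange (done.length : Int) ((done.length : Int) + t) 1).foldl istep
          (pre ++ (done ++ List.replicate t ([] : PvCell)) :: rest, d)
        = (pre ++ (done ++ pvRowRef g per d t) :: rest, d + per * t) := by
  intro t
  induction t with
  | zero =>
    intro pre rest done d hc
    simp [PySem.List.pyRange_one_eq_nil, pvRowRef]
  | succ t ih =>
    intro pre rest done d hc
    rw [PySem.List.pyRange_one_cons (by push_cast [List.length_cons]; omega)]
    simp only [List.foldl_cons, List.replicate_succ]
    rw [H pre done (List.replicate t []) rest d hc]
    have h2 := ih pre rest (done ++ [g d]) (d + per) hc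
    simp only [List.length_append, List.length_singleton, List.append_assoc,
      List.singleton_append] at h2 ⊢
    rw [show ((done.length : Int) + (t+1 : Nat)) = ((done.length + 1 : Nat) : Int) + (t:Nat) by push_cast; ring,
      show ((done.length : Int) + 1) = ((done.length + 1 : Nat) : Int) by push_cast; ring]
    rw [h2]
    simp only [pvRowRef, Prod.mk.injEq]
    exact ⟨trivial, by push_cast; ring⟩

def pvSkel (n : Nat) : PvRow := List.replicate n ([] : PvCell)

-- phase 2, teacher on the left: columns in increasing order
lemma pvOuterFwd (istep : Int → PvMat × Int → Int → PvMat × Int) (g : Int → PvCell) (per : Int)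
    (H : ∀ (ci : Int) (pre : PvMat) (done tail : PvRow) (rest : PvMat) (d : Int),
      (pre.length : Int) = ci →
      istep ci (pre ++ (done ++ ([] : PvCell) :: tail) :: rest, d) (done.length : Int)
        = (pre ++ (done ++ g d :: tail) :: rest, d + per)) :
    ∀ (ns : List Nat) (pre : PvMat) (d : Int),
      (PySem.List.pyRange (pre.length : Int) ((pre.length : Int) + ns.length) 1).foldl
        (fun st colIndex =>
          (PySem.List.pyRange 0 (PySem.List.len (PySem.List.pyGetD st.1 colIndex [])) 1).foldl
            (istep colIndex) st)
        (pre ++ ns.map pvSkel, d)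
      = (pre ++ pvFillFwd g per ns d, d + per * (ns.sum : Int)) := by
  intro ns
  induction ns with
  | nil => intro pre d; simp [PySem.List.pyRange_one_eq_nil, pvFillFwd]
  | cons n ns ih =>
    intro pre d
    rw [PySem.List.pyRange_one_cons (by push_cast [List.length_cons]; omega)]
    simp only [List.foldl_cons, List.map_cons]
    have hrow : PySem.List.pyGetD (pre ++ pvSkel n :: ns.map pvSkel) (pre.length : Int) [] = pvSkel n :=
      pvGetAt _ _ _ _
    rw [hrow]
    have hlen : PySem.List.len (pvSkel n) = (n : Int) := by
      simp [PySem.List.len_eq, pvSkel]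
    rw [hlen]
    have hinner := pvInnerLoop (istep (pre.length : Int)) g per (pre.length : Int)
      (fun pre' done tail rest d hc => H _ pre' done tail rest d hc) n pre (ns.map pvSkel) [] d rfl
    simp only [List.length_nil, Nat.cast_zero, zero_add, List.nil_append] at hinner
    rw [show (pvSkel n : PvRow) = List.replicate n ([] : PvCell) from rfl, hinner]
    have ih2 := ih (pre ++ [pvRowRef g per d n]) (d + per * n)
    simp only [List.length_append, List.length_singleton, List.append_assoc,
      List.singleton_append] at ih2
    rw [show ((pre.length : Int) + ((n :: ns).length : Nat)) = ((pre.length + 1 : Nat) : Int) + (ns.length : Nat) by push_cast [List.length_cons]; ring,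
      show ((pre.length : Int) + 1) = ((pre.length + 1 : Nat) : Int) by push_cast; ring]
    rw [ih2]
    simp only [pvFillFwd, Prod.mk.injEq]
    exact ⟨trivial, by push_cast [List.sum_cons]; ring⟩

lemma pvFillBwd_append (g : Int → PvCell) (per : Int) (ns : List Nat) (n : Nat) (d : Int) :
    pvFillBwd g per (ns ++ [n]) d
      = ((pvFillBwd g per ns (d + per * n)).1 ++ [pvRowRef g per d n],
         (pvFillBwd g per ns (d + per * n)).2) := by
  induction ns generalizing d with
  | nil => simp [pvFillBwd]
  | cons m ns ih => simp [pvFillBwd, ih]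

-- phase 2, teacher elsewhere: columns in decreasing order
lemma pvOuterBwd (istep : Int → PvMat × Int → Int → PvMat × Int) (g : Int → PvCell) (per : Int)
    (H : ∀ (ci : Int) (pre : PvMat) (done tail : PvRow) (rest : PvMat) (d : Int),
      (pre.length : Int) = ci →
      istep ci (pre ++ (done ++ ([] : PvCell) :: tail) :: rest, d) (done.length : Int)
        = (pre ++ (done ++ g d :: tail) :: rest, d + per)) :
    ∀ (ns : List Nat) (done : PvMat) (d : Int),
      (PySem.List.pyRange ((ns.length : Int) - 1) (-1) (-1)).foldl
        (fun st colIndex =>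
          (PySem.List.pyRange 0 (PySem.List.len (PySem.List.pyGetD st.1 colIndex [])) 1).foldl
            (istep colIndex) st)
        (ns.map pvSkel ++ done, d)
      = ((pvFillBwd g per ns d).1 ++ done, (pvFillBwd g per ns d).2) := by
  intro ns
  induction ns using List.reverseRecOn with
  | nil =>
    intro done d
    simp [PySem.List.pyRange_neg_one_eq_nil, pvFillBwd]
  | append_singleton ns n ih =>
    intro done d
    have hlen : (((ns ++ [n]).length : Nat) : Int) - 1 = (ns.length : Int) := by
      push_cast [List.length_append, List.length_singleton]; ring
    rw [hlen, PySem.List.pyRange_neg_one_cons (by omega)]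
    simp only [List.foldl_cons, List.map_append, List.map_cons, List.map_nil,
      List.append_assoc, List.singleton_append]
    have hget : PySem.List.pyGetD (ns.map pvSkel ++ pvSkel n :: done) ((ns.length : Int)) [] = pvSkel n := by
      have h := pvGetAt (ns.map pvSkel) (pvSkel n) done ([] : PvRow)
      simp only [List.length_map] at h
      exact h
    rw [hget]
    have hl : PySem.List.len (pvSkel n) = (n : Int) := by simp [PySem.List.len_eq, pvSkel]
    rw [hl]
    have hinner := pvInnerLoop (istep (ns.length : Int)) g per (ns.length : Int)
      (fun pre' done' tail rest d hc => H _ pre' done' tail rest d hc) n (ns.map pvSkel) done [] d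
      (by simp)
    simp only [List.length_nil, Nat.cast_zero, zero_add, List.nil_append] at hinner
    rw [show (pvSkel n : PvRow) = List.replicate n ([] : PvCell) from rfl, hinner]
    have ih2 := ih (pvRowRef g per d n :: done) (d + per * n)
    rw [show ((ns.length : Int)) - 1 = ((ns.length : Int) - 1) from rfl] at ih2
    rw [ih2, pvFillBwd_append]
    simp

-- B's prefix-sum loop
lemma pvStartsFold (l : List Int) (acc : List Int) (n : Int) :
    l.foldl (fun (st : List Int × Int) size => (st.1 ++ [st.2], st.2 + size)) (acc, n)
      = (acc ++ pvStartsFrom n l, n + l.sum) := by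
  induction l generalizing acc n with
  | nil => simp [pvStartsFrom]
  | cons s l ih => simp [pvStartsFrom, ih, add_assoc]

lemma pvStartsFrom_append (d : Int) (xs ys : List Int) :
    pvStartsFrom d (xs ++ ys) = pvStartsFrom d xs ++ pvStartsFrom (d + xs.sum) ys := by
  induction xs generalizing d with
  | nil => simp [pvStartsFrom]
  | cons s xs ih => simp [pvStartsFrom, ih, add_assoc]

lemma pvStartsRev (sizes : List Int) (d : Int) :
    (pvStartsFrom d sizes.reverse).reverse = pvStartsB d sizes := by
  induction sizes with
  | nil => simp [pvStartsFrom, pvStartsB]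
  | cons s rest ih =>
    simp only [List.reverse_cons, pvStartsFrom_append, pvStartsB, pvStartsFrom,
      List.reverse_append, List.reverse_cons, List.reverse_nil, List.nil_append,
      List.sum_reverse]
    simp [ih]

-- B's per-row comprehension equals the reference row
lemma pvRowMap (g : Int → PvCell) (per : Int) (t : Nat) (s : Int) :
    (List.range t).map (fun (k : Nat) => g (s + per * (k : Int))) = pvRowRef g per s t := by
  induction t generalizing s with
  | zero => simp [pvRowRef]
  | succ t ih =>
    rw [List.range_succ_eq_map, List.map_cons, List.map_map]
    rw [pvRowRef, ← ih (s + per)]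
    simp only [Nat.cast_zero, mul_zero, add_zero, List.cons.injEq]
    refine ⟨trivial, List.map_congr_left (fun k _ => by
      simp [Function.comp, Nat.succ_eq_add_one]; ring_nf)⟩

-- the two dict-update shapes a cell goes through in A
lemma pvCell1 (a : Int) :
    ((PySem.Dict.mk ([] : PvCell)).insert a pvInner).items = [(a, pvInner)] := by
  simp [PySem.Dict.items_insert]

lemma pvCell2 (a b : Int) (hab : b ≠ a) :
    ((PySem.Dict.mk ([(a, pvInner)])).insert b pvInner).items
      = [(a, pvInner), (b, pvInner)] := by
  rw [PySem.Dict.items_insert_of_not_contains]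
  · rfl
  · simp
    omega

-- B's cell dict comprehension over distinct fresh keys
lemma pvCellComp (offs : List Int) (a : Int) (h : (offs.map (fun k => a + k)).Nodup) :
    ((offs.foldl (fun d k => d.insert (a + k) pvInner)
        (PySem.Dict.mk ([] : PvCell)))).items
      = offs.map (fun k => (a + k, pvInner)) := by
  rw [PySem.Dict.items_foldl_insert_fresh]
  · simp
  · intro k _; simp
  · exact h

lemma pvSumSz (per : Int) (l : List Int) :
    (l.map (fun c => per * max c 0)).sum = per * (((l.map Int.toNat).sum : Nat) : Int) := by
  induction l with
  | nil => simp
  | cons c l ih =>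
    simp only [List.map_cons, List.sum_cons, ih]
    rw [← Int.toNat_eq_max]
    push_cast
    ring

lemma pvFillBwd_snd (g : Int → PvCell) (per : Int) (ns : List Nat) (d : Int) :
    (pvFillBwd g per ns d).2 = d + per * ((ns.sum : Nat) : Int) := by
  induction ns generalizing d with
  | nil => simp [pvFillBwd]
  | cons n ns ih => simp [pvFillBwd, ih]; ring

lemma pvZipFwd (g : Int → PvCell) (per : Int) (counts : List Int) (d : Int) :
    (counts.zip (pvStartsFrom d (counts.map (fun c => per * max c 0)))).map
        (fun p => pvRowRef g per p.2 p.1.toNat)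
      = pvFillFwd g per (counts.map Int.toNat) d := by
  induction counts generalizing d with
  | nil => simp [pvFillFwd]
  | cons c l ih =>
    simp only [List.map_cons, pvStartsFrom, List.zip_cons_cons, pvFillFwd, List.cons.injEq]
    refine ⟨trivial, ?_⟩
    rw [← Int.toNat_eq_max, ih (d + per * (c.toNat : Int))]

lemma pvZipBwd (g : Int → PvCell) (per : Int) (counts : List Int) (d : Int) :
    (counts.zip (pvStartsB d (counts.map (fun c => per * max c 0)))).map
        (fun p => pvRowRef g per p.2 p.1.toNat)
      = (pvFillBwd g per (counts.map Int.toNat) d).1 := by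
  induction counts generalizing d with
  | nil => simp [pvFillBwd]
  | cons c l ih =>
    simp only [List.map_cons, pvStartsB, List.zip_cons_cons, pvFillBwd, List.cons.injEq]
    refine ⟨?_, ih d⟩
    rw [pvFillBwd_snd, pvSumSz]

-- clean corollaries for pre = []
lemma pvOuterFwd0 (istep : Int → PvMat × Int → Int → PvMat × Int) (g : Int → PvCell) (per : Int)
    (H : ∀ (ci : Int) (pre : PvMat) (done tail : PvRow) (rest : PvMat) (d : Int),
      (pre.length : Int) = ci →
      istep ci (pre ++ (done ++ ([] : PvCell) :: tail) :: rest, d) (done.length : Int)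
        = (pre ++ (done ++ g d :: tail) :: rest, d + per))
    (ns : List Nat) (d : Int) :
    (PySem.List.pyRange 0 (PySem.List.len (ns.map pvSkel)) 1).foldl
        (fun st colIndex =>
          (PySem.List.pyRange 0 (PySem.List.len (PySem.List.pyGetD st.1 colIndex [])) 1).foldl
            (istep colIndex) st)
        (ns.map pvSkel, d)
      = (pvFillFwd g per ns d, d + per * (ns.sum : Int)) := by
  have h := pvOuterFwd istep g per H ns [] d
  simpa using h

lemma pvOuterBwd0 (istep : Int → PvMat × Int → Int → PvMat × Int) (g : Int → PvCell) (per : Int)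
    (H : ∀ (ci : Int) (pre : PvMat) (done tail : PvRow) (rest : PvMat) (d : Int),
      (pre.length : Int) = ci →
      istep ci (pre ++ (done ++ ([] : PvCell) :: tail) :: rest, d) (done.length : Int)
        = (pre ++ (done ++ g d :: tail) :: rest, d + per))
    (ns : List Nat) (d : Int) :
    (PySem.List.pyRange (PySem.List.len (ns.map pvSkel) - 1) (-1) (-1)).foldl
        (fun st colIndex =>
          (PySem.List.pyRange 0 (PySem.List.len (PySem.List.pyGetD st.1 colIndex [])) 1).foldl
            (istep colIndex) st)
        (ns.map pvSkel, d)
      = ((pvFillBwd g per ns d).1, (pvFillBwd g per ns d).2) := by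
  have h := pvOuterBwd istep g per H ns [] d
  simpa using h

-- from Pre_: every parsed count is nonnegative
lemma pvCountsNonneg (pieces : List String)
    (h : (pieces.all (fun s => match PySem.Int.ofStr? s with
                               | some v => decide (0 ≤ v)
                               | none => false)) = true) :
    ∀ c ∈ pieces.map (fun x => (PySem.Int.ofStr? x).getD 0), 0 ≤ c := by
  intro c hc
  rw [List.mem_map] at hc
  obtain ⟨s, hs, rfl⟩ := hc
  have h2 := List.all_eq_true.mp h s hs
  cases hof : PySem.Int.ofStr? s with
  | none => rw [hof] at h2; simp at h2
  | some v => rw [hof] at h2; simp at h2 ⊢; simpa [hof] using h2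

theorem pvMain (kacli ogretmen_yonu oturma_duzeni : String)
    (hpre : Pre_create_arrangement kacli ogretmen_yonu oturma_duzeni) :
    create_arrangement kacli ogretmen_yonu oturma_duzeni
      = create_arrangement_alt kacli ogretmen_yonu oturma_duzeni := by
  unfold create_arrangement create_arrangement_alt
  dsimp only
  rw [pvSkeleton]
  simp only [List.nil_append]
  rw [show ((PySem.Str.split? oturma_duzeni ",").getD []).map
        (fun rc => List.replicate ((PySem.Int.ofStr? rc).getD 0).toNat ([] : PvCell))
      = (((PySem.Str.split? oturma_duzeni ",").getD []).map
          (fun x => (PySem.Int.ofStr? x).getD 0)).map (fun c => pvSkel c.toNat) by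
    simp [List.map_map, pvSkel, Function.comp]]
  have hnn := pvCountsNonneg ((PySem.Str.split? oturma_duzeni ",").getD []) hpre
  set counts := ((PySem.Str.split? oturma_duzeni ",").getD []).map
    (fun x => (PySem.Int.ofStr? x).getD 0) with hcounts
  rw [show counts.map (fun c => pvSkel c.toNat) = (counts.map Int.toNat).map pvSkel by
    simp [List.map_map, Function.comp]]
  set ns := counts.map Int.toNat with hns
  have hsz : ∀ per : Int, counts.map (fun c => per * c) = counts.map (fun c => per * max c 0) :=
    fun per => List.map_congr_left (fun c hc => by rw [max_eq_left (hnn c hc)])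
  by_cases hy : (ogretmen_yonu == "Solda") = true
  · -- Solda: forward fill, offsets left to right
    simp only [hy, ite_true]
    by_cases hk : (kacli == "2'li") = true
    · -- two desks per cell
      simp only [hk, ite_true]
      have H2 : ∀ (ci : Int) (pre : PvMat) (done tail : PvRow) (rest : PvMat) (d : Int),
          (pre.length : Int) = ci →
          (fun (st : PvMat × Int) (rowIndex : Int) =>
              (pvUpd (pvUpd st.1 ci rowIndex st.2) ci rowIndex (st.2 + 1), st.2 + 1 + 1))
            (pre ++ (done ++ ([] : PvCell) :: tail) :: rest, d) (done.length : Int)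
          = (pre ++ (done ++ [(d, pvInner), (d + 1, pvInner)] :: tail) :: rest, d + 2) := by
        intro ci pre done tail rest d hc
        subst hc
        dsimp only
        rw [pvUpd_eq, pvCell1, pvUpd_eq, pvCell2 d (d + 1) (by omega)]
        refine congrArg _ (by ring)
      refine Eq.trans (congrArg Prod.fst (pvOuterFwd0 _ _ 2 H2 ns 1)) ?_
      dsimp only
      rw [hsz 2, pvStartsFold]
      dsimp only
      simp only [List.nil_append]
      have hoffs : PySem.List.pyRange 0 2 1 = ([0, 1] : List Int) := by decide
      rw [hoffs]
      have hrow : ∀ (p : Int × Int),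
          (PySem.List.pyRange 0 p.1 1).map (fun j =>
              ((([0, 1] : List Int).foldl
                (fun d k => d.insert (p.2 + 2 * j + k) pvInner)
                (PySem.Dict.mk ([] : PvCell)))).items)
            = pvRowRef (fun d => [(d, pvInner), (d + 1, pvInner)]) 2 p.2 p.1.toNat := by
        intro p
        have hcell : ∀ j : Int,
            ((([0, 1] : List Int).foldl
              (fun d k => d.insert (p.2 + 2 * j + k) pvInner)
              (PySem.Dict.mk ([] : PvCell)))).items
            = [(p.2 + 2 * j, pvInner), (p.2 + 2 * j + 1, pvInner)] := by
          intro j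
          rw [pvCellComp ([0, 1] : List Int) (p.2 + 2 * j) (by simp)]
          simp
        simp only [hcell]
        rw [PySem.List.pyRange_one, List.map_map]
        simp only [Function.comp_def, zero_add, Int.sub_zero]
        exact pvRowMap (fun n => [(n, pvInner), (n + 1, pvInner)]) 2 _ p.2
      simp only [hrow]
      rw [pvZipFwd]
    · -- one desk per cell
      rw [Bool.not_eq_true] at hk
      simp only [hk, Bool.false_eq_true, ite_false]
      have H2 : ∀ (ci : Int) (pre : PvMat) (done tail : PvRow) (rest : PvMat) (d : Int),
          (pre.length : Int) = ci →
          (fun (st : PvMat × Int) (rowIndex : Int) =>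
              (pvUpd st.1 ci rowIndex st.2, st.2 + 1))
            (pre ++ (done ++ ([] : PvCell) :: tail) :: rest, d) (done.length : Int)
          = (pre ++ (done ++ [(d, pvInner)] :: tail) :: rest, d + 1) := by
        intro ci pre done tail rest d hc
        subst hc
        dsimp only
        rw [pvUpd_eq, pvCell1]
      refine Eq.trans (congrArg Prod.fst (pvOuterFwd0 _ _ 1 H2 ns 1)) ?_
      dsimp only
      rw [hsz 1, pvStartsFold]
      dsimp only
      simp only [List.nil_append]
      have hoffs : PySem.List.pyRange 0 1 1 = ([0] : List Int) := by decide
      rw [hoffs]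
      have hrow : ∀ (p : Int × Int),
          (PySem.List.pyRange 0 p.1 1).map (fun j =>
              ((([0] : List Int).foldl
                (fun d k => d.insert (p.2 + 1 * j + k) pvInner)
                (PySem.Dict.mk ([] : PvCell)))).items)
            = pvRowRef (fun d => [(d, pvInner)]) 1 p.2 p.1.toNat := by
        intro p
        have hcell : ∀ j : Int,
            ((([0] : List Int).foldl
              (fun d k => d.insert (p.2 + 1 * j + k) pvInner)
              (PySem.Dict.mk ([] : PvCell)))).items
            = [(p.2 + 1 * j, pvInner)] := by
          intro j
          rw [pvCellComp ([0] : List Int) (p.2 + 1 * j) (by simp)]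
          simp
        simp only [hcell]
        rw [PySem.List.pyRange_one, List.map_map]
        simp only [Function.comp_def, zero_add, Int.sub_zero]
        exact pvRowMap (fun n => [(n, pvInner)]) 1 _ p.2
      simp only [hrow]
      rw [pvZipFwd]
  · -- teacher not on the left: backward fill, offsets right to left
    rw [Bool.not_eq_true] at hy
    simp only [hy, Bool.false_eq_true, ite_false]
    by_cases hk : (kacli == "1'li") = true
    · -- one desk per cell
      simp only [hk, ite_true]
      have H2 : ∀ (ci : Int) (pre : PvMat) (done tail : PvRow) (rest : PvMat) (d : Int),
          (pre.length : Int) = ci →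
          (fun (st : PvMat × Int) (rowIndex : Int) =>
              (pvUpd st.1 ci rowIndex st.2, st.2 + 1))
            (pre ++ (done ++ ([] : PvCell) :: tail) :: rest, d) (done.length : Int)
          = (pre ++ (done ++ [(d, pvInner)] :: tail) :: rest, d + 1) := by
        intro ci pre done tail rest d hc
        subst hc
        dsimp only
        rw [pvUpd_eq, pvCell1]
      refine Eq.trans (congrArg Prod.fst (pvOuterBwd0 _ _ 1 H2 ns 1)) ?_
      dsimp only
      rw [hsz 1, pvStartsFold]
      dsimp only
      simp only [List.nil_append]
      rw [pvStartsRev]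
      have hoffs : PySem.List.pyRange (1 - 1) (-1) (-1) = ([0] : List Int) := by decide
      rw [hoffs]
      have hrow : ∀ (p : Int × Int),
          (PySem.List.pyRange 0 p.1 1).map (fun j =>
              ((([0] : List Int).foldl
                (fun d k => d.insert (p.2 + 1 * j + k) pvInner)
                (PySem.Dict.mk ([] : PvCell)))).items)
            = pvRowRef (fun d => [(d, pvInner)]) 1 p.2 p.1.toNat := by
        intro p
        have hcell : ∀ j : Int,
            ((([0] : List Int).foldl
              (fun d k => d.insert (p.2 + 1 * j + k) pvInner)
              (PySem.Dict.mk ([] : PvCell)))).items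
            = [(p.2 + 1 * j, pvInner)] := by
          intro j
          rw [pvCellComp ([0] : List Int) (p.2 + 1 * j) (by simp)]
          simp
        simp only [hcell]
        rw [PySem.List.pyRange_one, List.map_map]
        simp only [Function.comp_def, zero_add, Int.sub_zero]
        exact pvRowMap (fun n => [(n, pvInner)]) 1 _ p.2
      simp only [hrow]
      rw [pvZipBwd]
    · -- two desks per cell, listed right to left: (n+1, n)
      rw [Bool.not_eq_true] at hk
      simp only [hk, Bool.false_eq_true, ite_false]
      have H2 : ∀ (ci : Int) (pre : PvMat) (done tail : PvRow) (rest : PvMat) (d : Int),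
          (pre.length : Int) = ci →
          (fun (st : PvMat × Int) (rowIndex : Int) =>
              (pvUpd (pvUpd st.1 ci rowIndex (st.2 + 1)) ci rowIndex (st.2 + 1 - 1), st.2 + 1 - 1 + 2))
            (pre ++ (done ++ ([] : PvCell) :: tail) :: rest, d) (done.length : Int)
          = (pre ++ (done ++ [(d + 1, pvInner), (d, pvInner)] :: tail) :: rest, d + 2) := by
        intro ci pre done tail rest d hc
        subst hc
        dsimp only
        rw [pvUpd_eq, pvCell1, show d + 1 - 1 = d by ring, pvUpd_eq,
          pvCell2 (d + 1) d (by omega)]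
      refine Eq.trans (congrArg Prod.fst (pvOuterBwd0 _ _ 2 H2 ns 1)) ?_
      dsimp only
      rw [hsz 2, pvStartsFold]
      dsimp only
      simp only [List.nil_append]
      rw [pvStartsRev]
      have hoffs : PySem.List.pyRange (2 - 1) (-1) (-1) = ([1, 0] : List Int) := by decide
      rw [hoffs]
      have hrow : ∀ (p : Int × Int),
          (PySem.List.pyRange 0 p.1 1).map (fun j =>
              ((([1, 0] : List Int).foldl
                (fun d k => d.insert (p.2 + 2 * j + k) pvInner)
                (PySem.Dict.mk ([] : PvCell)))).items)
            = pvRowRef (fun d => [(d + 1, pvInner), (d, pvInner)]) 2 p.2 p.1.toNat := by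
        intro p
        have hcell : ∀ j : Int,
            ((([1, 0] : List Int).foldl
              (fun d k => d.insert (p.2 + 2 * j + k) pvInner)
              (PySem.Dict.mk ([] : PvCell)))).items
            = [(p.2 + 2 * j + 1, pvInner), (p.2 + 2 * j, pvInner)] := by
          intro j
          rw [pvCellComp ([1, 0] : List Int) (p.2 + 2 * j) (by simp)]
          simp
        simp only [hcell]
        rw [PySem.List.pyRange_one, List.map_map]
        simp only [Function.comp_def, zero_add, Int.sub_zero]
        exact pvRowMap (fun n => [(n + 1, pvInner), (n, pvInner)]) 2 _ p.2
      simp only [hrow]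
      rw [pvZipBwd]

-- ===== VERDICT (by name: the statement is the Claim_ definition above) =====
theorem create_arrangement_spec : Claim_equal_create_arrangement := by
  intro kacli ogretmen_yonu oturma_duzeni _ hpre
  unfold Spec_create_arrangement
  exact pvMain kacli ogretmen_yonu oturma_duzeni hpre
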